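-- pv_equiv track=rewrite | github.com/Kingsford-Group/polarset | anchor_strat.py | sequence_mer_iterator
-- ===== SOURCE A (Python) =====
-- def sequence_mer_iterator(k, seq):
--     chmap = {'A': 0, 'C': 1, 'T': 2, 'G': 3}
--     slen = len(seq)
--     modulus = 4 ** k
--     cur = 0
--     for i in range(k-1):
--         cur = cur * 4 + chmap[seq[i]]
--     for i in range(k-1, slen):
--         cur = (cur * 4 + chmap[seq[i]]) % modulus
--         yield cur
-- ===== SOURCE B (Python) =====
-- def sequence_mer_iterator(k, seq):
--     chmap = {'A': 0, 'C': 1, 'T': 2, 'G': 3}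
--     win = [chmap[seq[i]] for i in range(k - 1)]
--     for i in range(k - 1, len(seq)):
--         win.append(chmap[seq[i]])
--         if len(win) > k:
--             win.pop(0)
--         cur = 0
--         for v in win:
--             cur = cur * 4 + v
--         yield cur
-- ===== Notes on version B (the rewrite author's own statement) =====
-- stated objective: alternative
-- what changed: B drops A's rolling accumulator and modulus and instead maintains the explicit sliding window of per-character codes, recomputing each window's base-4 value from its k codes; Pre_ excludes inputs where A raises and k<0, where A yields floats instead of ints.
-- outside the precondition, e.g. on sequence_mer_iterator(-1, 'AC'): A returns [0.0, 0.0, 0.0, 0.0], B returns [0, 0, 0, 0]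
import Mathlib
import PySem

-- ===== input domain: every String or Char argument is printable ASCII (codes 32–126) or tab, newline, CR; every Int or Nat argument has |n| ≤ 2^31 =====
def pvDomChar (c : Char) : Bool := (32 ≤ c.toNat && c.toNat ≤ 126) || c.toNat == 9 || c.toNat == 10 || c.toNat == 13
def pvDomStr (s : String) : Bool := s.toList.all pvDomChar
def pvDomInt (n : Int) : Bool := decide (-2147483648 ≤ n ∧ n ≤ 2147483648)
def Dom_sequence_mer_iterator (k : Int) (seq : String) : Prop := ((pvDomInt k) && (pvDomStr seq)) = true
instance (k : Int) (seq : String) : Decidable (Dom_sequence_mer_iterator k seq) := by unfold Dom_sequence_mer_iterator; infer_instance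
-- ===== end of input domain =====

-- B recomputes each window's code directly (no rolling accumulator, no modulus); equivalence is proved on
-- Pre_ (A returns ints there); same cost class, B is not claimed faster.

-- chmap[seq[j]] — shared by both Pythons verbatim; the getD defaults are unreachable on Pre_
-- (index in range, char in chmap), where it is exact.
def pvCode (seq : String) (j : Int) : Int :=
  (PySem.Dict.ofList [('A', 0), ('C', 1), ('T', 2), ('G', 3)]).getD
    ((PySem.Str.pyGet? seq j).getD 'A') 0

-- ===== PORT A =====
def sequence_mer_iterator (k : Int) (seq : String) : List Int :=
  let slen : Int := (seq.toList.length : Int)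
  let modulus : Int := 4 ^ k.toNat  -- 4 ** k; exact on Pre_ (0 ≤ k)
  let cur0 : Int := (PySem.List.pyRange 0 (k - 1) 1).foldl
    (fun cur i => cur * 4 + pvCode seq i) 0
  ((PySem.List.pyRange (k - 1) slen 1).foldl
    (fun (st : Int × List Int) i =>
      let cur := PySem.Int.mod (st.1 * 4 + pvCode seq i) modulus
      (cur, st.2 ++ [cur]))
    (cur0, ([] : List Int))).2

-- ===== PORT B =====
def sequence_mer_iterator_alt (k : Int) (seq : String) : List Int :=
  let win0 : List Int := (PySem.List.pyRange 0 (k - 1) 1).map (fun i => pvCode seq i)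
  ((PySem.List.pyRange (k - 1) ((seq.toList.length : Int)) 1).foldl
    (fun (st : List Int × List Int) i =>
      let win1 := st.1 ++ [pvCode seq i]
      -- win.pop(0): win1 is nonempty here (an element was just appended), so pop(0) leaves the tail
      let win2 := if k < (win1.length : Int) then win1.drop 1 else win1
      let cur := win2.foldl (fun cur v => cur * 4 + v) 0
      (win2, st.2 ++ [cur]))
    (win0, ([] : List Int))).2

-- ===== PRECONDITION & SPEC =====
-- Pre_ excludes exactly: inputs where A raises (sequence shorter than k-1, a character outside
-- 'ACTG', or k = 0 with empty sequence, where A reads seq[-1]) and k < 0, where A's modulus 4**k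
-- is a float so A yields floats, not ints (cited in claim.json).
def Pre_sequence_mer_iterator (k : Int) (seq : String) : Prop :=
  0 ≤ k ∧ k - 1 ≤ (seq.toList.length : Int) ∧
  (seq.toList.all (fun ch => ch == 'A' || ch == 'C' || ch == 'T' || ch == 'G')) = true ∧
  (k = 0 → 1 ≤ (seq.toList.length : Int))
instance (k : Int) (seq : String) : Decidable (Pre_sequence_mer_iterator k seq) := by
  unfold Pre_sequence_mer_iterator; infer_instance

def pvWitness_sequence_mer_iterator : Int × String := (2, "ACTG")

def Spec_sequence_mer_iterator (k : Int) (seq : String) (out : List Int) : Prop :=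
  out = sequence_mer_iterator_alt k seq
instance (k : Int) (seq : String) (out : List Int) : Decidable (Spec_sequence_mer_iterator k seq out) := by
  unfold Spec_sequence_mer_iterator; infer_instance

-- ===== CLAIM (what is proved, stated in full; the proofs are below) =====
def Claim_equal_sequence_mer_iterator : Prop :=
  ∀ (k : Int) (seq : String), Dom_sequence_mer_iterator k seq →
    Pre_sequence_mer_iterator k seq →
    Spec_sequence_mer_iterator k seq (sequence_mer_iterator k seq)
-- ===== LEMMAS AND PROOFS =====

-- the base-4 value of the window [a, b) of codes (B's inner loop; A's priming loop is pvW 0 (k-1))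
def pvW (c : Int → Int) (a b : Int) : Int :=
  (PySem.List.pyRange a b 1).foldl (fun cur j => cur * 4 + c j) 0

theorem pvCode_bounds (seq : String) (j : Int) : 0 ≤ pvCode seq j ∧ pvCode seq j < 4 := by
  unfold pvCode
  generalize (PySem.Str.pyGet? seq j).getD 'A' = ch
  have hitems : (PySem.Dict.ofList [('A', (0 : Int)), ('C', 1), ('T', 2), ('G', 3)]).items
      = [('A', 0), ('C', 1), ('T', 2), ('G', 3)] := by decide
  by_cases hA : 'A' = ch
  · subst hA; decide
  · by_cases hC : 'C' = ch
    · subst hC; decide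
    · by_cases hT : 'T' = ch
      · subst hT; decide
      · by_cases hG : 'G' = ch
        · subst hG; decide
        · have hA' : ('A' == ch) = false := beq_eq_false_iff_ne.mpr hA
          have hC' : ('C' == ch) = false := beq_eq_false_iff_ne.mpr hC
          have hT' : ('T' == ch) = false := beq_eq_false_iff_ne.mpr hT
          have hG' : ('G' == ch) = false := beq_eq_false_iff_ne.mpr hG
          simp [PySem.Dict.getD, PySem.Dict.get?, hitems, List.find?, hA', hC', hT', hG']

theorem pvW_nil (c : Int → Int) {a b : Int} (h : b ≤ a) : pvW c a b = 0 := by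
  unfold pvW; rw [PySem.List.pyRange_one_eq_nil h]; rfl

theorem pvW_snoc (c : Int → Int) {a b : Int} (h : a ≤ b) :
    pvW c a (b + 1) = pvW c a b * 4 + c b := by
  unfold pvW; rw [PySem.List.pyRange_one_succ_right h, List.foldl_append]; rfl

theorem pvW_bounds (c : Int → Int) (hc : ∀ j, 0 ≤ c j ∧ c j < 4) :
    ∀ (n : Nat) (a b : Int), (b - a).toNat = n → 0 ≤ pvW c a b ∧ pvW c a b < 4 ^ n := by
  intro n
  induction n with
  | zero =>
    intro a b h
    have hba : b ≤ a := by omega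
    rw [pvW_nil c hba]; norm_num
  | succ m ih =>
    intro a b h
    have hab : a ≤ b - 1 := by omega
    have hb : b = (b - 1) + 1 := by omega
    rw [hb, pvW_snoc c hab]
    have h1 := ih a (b - 1) (by omega)
    have h2 := hc (b - 1)
    have h3 : (4 : Int) ^ (m + 1) = 4 ^ m * 4 := by ring
    omega

theorem pvW_split (c : Int → Int) :
    ∀ (n : Nat) (a m b : Int), a ≤ m → m ≤ b → (b - m).toNat = n →
      pvW c a b = pvW c a m * 4 ^ n + pvW c m b := by
  intro n
  induction n with
  | zero =>
    intro a m b h1 h2 h3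
    have : b = m := by omega
    subst this
    rw [pvW_nil c le_rfl]; ring
  | succ t ih =>
    intro a m b h1 h2 h3
    have hb : b = (b - 1) + 1 := by omega
    have hmb : m ≤ b - 1 := by omega
    rw [hb, pvW_snoc c (le_trans h1 hmb), pvW_snoc c hmb,
        ih a m (b - 1) h1 hmb (by omega)]
    ring

-- A's main loop, for k ≥ 1: the accumulator stays ≡ prefix value mod 4^k, and each yielded
-- value is exactly B's window value.
theorem pvLoopA (c : Int → Int) (hc : ∀ j, 0 ≤ c j ∧ c j < 4) (k : Int) (hk : 1 ≤ k) :
    ∀ (n : Nat) (b : Int), k - 1 ≤ b → (b - (k - 1)).toNat = n →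
      (PySem.List.pyRange (k - 1) b 1).foldl
        (fun (st : Int × List Int) i =>
          let cur := PySem.Int.mod (st.1 * 4 + c i) (4 ^ k.toNat)
          (cur, st.2 ++ [cur]))
        (pvW c 0 (k - 1), ([] : List Int))
      = (PySem.Int.mod (pvW c 0 b) (4 ^ k.toNat),
         (PySem.List.pyRange (k - 1) b 1).map (fun i => pvW c (i - k + 1) (i + 1))) := by
  have hMpos : (0 : Int) < 4 ^ k.toNat := by positivity
  intro n
  induction n with
  | zero =>
    intro b hb h
    have : b = k - 1 := by omega
    subst this
    rw [PySem.List.pyRange_one_eq_nil le_rfl]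
    simp only [List.foldl_nil, List.map_nil]
    have hbd := pvW_bounds c hc (k - 1 - 0).toNat 0 (k - 1) rfl
    have hle : (4 : Int) ^ (k - 1 - 0).toNat ≤ 4 ^ k.toNat := by
      apply pow_le_pow_right₀ (by norm_num) (by omega)
    rw [PySem.Int.mod_eq_emod_of_pos hMpos, Int.emod_eq_of_lt (by omega) (by omega)]
  | succ m ih =>
    intro b hb h
    have hb1 : k - 1 ≤ b - 1 := by omega
    have hbeq : b = (b - 1) + 1 := by omega
    rw [hbeq, PySem.List.pyRange_one_succ_right hb1, List.foldl_append, List.map_append,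
        ih (b - 1) hb1 (by omega)]
    simp only [List.foldl_cons, List.foldl_nil, List.map_cons, List.map_nil]
    have h0b : (0 : Int) ≤ b - 1 := by omega
    -- the new accumulator: mod distributes
    have hacc : PySem.Int.mod (PySem.Int.mod (pvW c 0 (b - 1)) (4 ^ k.toNat) * 4 + c (b - 1)) (4 ^ k.toNat)
        = PySem.Int.mod (pvW c 0 ((b - 1) + 1)) (4 ^ k.toNat) := by
      rw [pvW_snoc c h0b]
      rw [PySem.Int.mod_eq_emod_of_pos hMpos, PySem.Int.mod_eq_emod_of_pos hMpos,
          PySem.Int.mod_eq_emod_of_pos hMpos]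
      conv_rhs => rw [Int.add_emod, Int.mul_emod]
      conv_lhs => rw [Int.add_emod, Int.mul_emod, Int.emod_emod_of_dvd _ (dvd_refl _)]
    -- the yielded value is the window value
    have hyield : PySem.Int.mod (pvW c 0 ((b - 1) + 1)) (4 ^ k.toNat)
        = pvW c ((b - 1) - k + 1) ((b - 1) + 1) := by
      have hsplit := pvW_split c (((b - 1) + 1) - ((b - 1) - k + 1)).toNat 0 ((b - 1) - k + 1)
        ((b - 1) + 1) (by omega) (by omega) rfl
      have hkn : (((b - 1) + 1) - ((b - 1) - k + 1)).toNat = k.toNat := by omega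
      rw [hkn] at hsplit
      have hbd := pvW_bounds c hc (((b - 1) + 1) - ((b - 1) - k + 1)).toNat ((b - 1) - k + 1)
        ((b - 1) + 1) rfl
      rw [hkn] at hbd
      rw [PySem.Int.mod_eq_emod_of_pos hMpos, hsplit,
          show pvW c 0 (b - 1 - k + 1) * 4 ^ k.toNat + pvW c (b - 1 - k + 1) (b - 1 + 1)
            = pvW c (b - 1 - k + 1) (b - 1 + 1) + 4 ^ k.toNat * pvW c 0 (b - 1 - k + 1) from by ring,
          Int.add_mul_emod_self_left, Int.emod_eq_of_lt (by omega) (by omega)]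
    rw [hacc, hyield]

-- A's main loop for k = 0: modulus is 1, every yielded value is 0.
theorem pvLoopA_zero (c : Int → Int) :
    ∀ (l : List Int) (acc : List Int),
      (l.foldl
        (fun (st : Int × List Int) i =>
          let cur := PySem.Int.mod (st.1 * 4 + c i) (4 ^ (0 : Int).toNat)
          (cur, st.2 ++ [cur]))
        (0, acc))
      = (if l = [] then 0 else 0, acc ++ l.map (fun _ => 0)) := by
  intro l
  induction l with
  | nil => intro acc; simp
  | cons x t ih =>
    intro acc
    simp only [List.foldl_cons, List.map_cons]
    have : PySem.Int.mod (0 * 4 + c x) (4 ^ (0 : Int).toNat) = 0 := by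
      rw [PySem.Int.mod_eq_emod_of_pos (by norm_num)]
      simp
    simp only [this, ih]
    simp


-- B's main loop, for k ≥ 1: the window list is exactly the codes of the last min(k, processed)
-- positions, and each yielded value is the window's base-4 value.
theorem pvLoopB (c : Int → Int) (k : Int) (hk : 1 ≤ k) :
    ∀ (n : Nat) (b : Int), k - 1 ≤ b → (b - (k - 1)).toNat = n →
      (PySem.List.pyRange (k - 1) b 1).foldl
        (fun (st : List Int × List Int) i =>
          let win1 := st.1 ++ [c i]
          let win2 := if k < (win1.length : Int) then win1.drop 1 else win1
          let cur := win2.foldl (fun cur v => cur * 4 + v) 0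
          (win2, st.2 ++ [cur]))
        ((PySem.List.pyRange 0 (k - 1) 1).map c, ([] : List Int))
      = ((PySem.List.pyRange (max (b - k) 0) b 1).map c,
         (PySem.List.pyRange (k - 1) b 1).map (fun i => pvW c (i - k + 1) (i + 1))) := by
  intro n
  induction n with
  | zero =>
    intro b hb h
    have hbk : b = k - 1 := by omega
    subst hbk
    rw [PySem.List.pyRange_one_eq_nil le_rfl]
    simp only [List.foldl_nil, List.map_nil]
    rw [show max (k - 1 - k) 0 = 0 from by omega]
  | succ m ih =>
    intro b hb h
    have hb1 : k - 1 ≤ b - 1 := by omega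
    have hbeq : b = (b - 1) + 1 := by omega
    rw [hbeq, PySem.List.pyRange_one_succ_right hb1, List.foldl_append, List.map_append,
        ih (b - 1) hb1 (by omega)]
    simp only [List.foldl_cons, List.foldl_nil, List.map_cons, List.map_nil]
    have hm0 : max (b - 1 - k) 0 ≤ b - 1 := by omega
    -- the appended window
    have happ : (PySem.List.pyRange (max (b - 1 - k) 0) (b - 1) 1).map c ++ [c (b - 1)]
        = (PySem.List.pyRange (max (b - 1 - k) 0) ((b - 1) + 1) 1).map c := by
      rw [PySem.List.pyRange_one_succ_right hm0, List.map_append]; rfl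
    have hlen : ((((PySem.List.pyRange (max (b - 1 - k) 0) ((b - 1) + 1) 1).map c).length : Int))
        = (b - 1) + 1 - max (b - 1 - k) 0 := by
      rw [List.length_map, PySem.List.length_pyRange_one]; omega
    -- the window after the conditional pop
    have hwin : (if k < ((((PySem.List.pyRange (max (b - 1 - k) 0) (b - 1) 1).map c ++ [c (b - 1)]).length : Int))
            then ((PySem.List.pyRange (max (b - 1 - k) 0) (b - 1) 1).map c ++ [c (b - 1)]).drop 1
            else (PySem.List.pyRange (max (b - 1 - k) 0) (b - 1) 1).map c ++ [c (b - 1)])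
        = (PySem.List.pyRange ((b - 1) - k + 1) ((b - 1) + 1) 1).map c := by
      rw [happ, hlen]
      by_cases hcase : k ≤ b - 1
      · rw [if_pos (by omega)]
        rw [show max (b - 1 - k) 0 = b - 1 - k from by omega,
            PySem.List.pyRange_one_cons (by omega : b - 1 - k < (b - 1) + 1), List.map_cons,
            List.drop_one, List.tail_cons,
            show b - 1 - k + 1 = (b - 1) - k + 1 from by ring]
      · rw [if_neg (by omega)]
        rw [show max (b - 1 - k) 0 = 0 from by omega, show (b - 1) - k + 1 = 0 from by omega]
    rw [hwin]
    -- the yielded value is the window's base-4 value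
    have hcur : ((PySem.List.pyRange ((b - 1) - k + 1) ((b - 1) + 1) 1).map c).foldl
          (fun cur v => cur * 4 + v) 0
        = pvW c ((b - 1) - k + 1) ((b - 1) + 1) := by
      rw [List.foldl_map]; rfl
    rw [hcur, show max (b - 1 + 1 - k) 0 = (b - 1) - k + 1 from by omega]

-- B's main loop for k = 0: the window is popped empty at once, every yielded value is 0.
theorem pvLoopB_zero (c : Int → Int) :
    ∀ (l : List Int) (acc : List Int),
      (l.foldl
        (fun (st : List Int × List Int) i =>
          let win1 := st.1 ++ [c i]
          let win2 := if (0 : Int) < (win1.length : Int) then win1.drop 1 else win1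
          let cur := win2.foldl (fun cur v => cur * 4 + v) 0
          (win2, st.2 ++ [cur]))
        (([] : List Int), acc))
      = (([] : List Int), acc ++ l.map (fun _ => 0)) := by
  intro l
  induction l with
  | nil => intro acc; simp
  | cons x t ih =>
    intro acc
    rw [List.foldl_cons,
        show (let win1 := (([] : List Int), acc).1 ++ [c x]
              let win2 := if (0 : Int) < (win1.length : Int) then win1.drop 1 else win1
              let cur := win2.foldl (fun cur v => cur * 4 + v) 0
              (win2, (([] : List Int), acc).2 ++ [cur]))
          = (([] : List Int), acc ++ [0]) from by simp,
        ih]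
    simp

theorem sequence_mer_iterator_eq_alt (k : Int) (seq : String) (hk : 0 ≤ k) :
    sequence_mer_iterator k seq = sequence_mer_iterator_alt k seq := by
  unfold sequence_mer_iterator sequence_mer_iterator_alt
  dsimp only
  set c := pvCode seq with hc
  set slen : Int := (seq.toList.length : Int) with hslen
  have hc4 : ∀ j, 0 ≤ c j ∧ c j < 4 := fun j => pvCode_bounds seq j
  rcases eq_or_lt_of_le hk with hk0 | hk1
  · -- k = 0 : every yielded value is 0 on both sides
    subst hk0
    have hzA := pvLoopA_zero c (PySem.List.pyRange (0 - 1) slen 1) []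
    have hzB := pvLoopB_zero c (PySem.List.pyRange (0 - 1) slen 1) []
    simp only [show ((PySem.List.pyRange 0 (0 - 1) 1).foldl (fun cur i => cur * 4 + c i) 0) = 0 from rfl,
               show ((PySem.List.pyRange 0 (0 - 1) 1).map c) = ([] : List Int) from rfl]
    rw [hzA, hzB]
  · -- k ≥ 1
    have hk1' : 1 ≤ k := hk1
    rcases le_or_gt (k - 1) slen with hle | hlt
    · have hinit : (PySem.List.pyRange 0 (k - 1) 1).foldl (fun cur i => cur * 4 + c i) 0
          = pvW c 0 (k - 1) := rfl
      rw [hinit, pvLoopA c hc4 k hk1' (slen - (k - 1)).toNat slen hle rfl,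
          pvLoopB c k hk1' (slen - (k - 1)).toNat slen hle rfl]
    · rw [PySem.List.pyRange_one_eq_nil (le_of_lt hlt)]
      rfl

-- ===== VERDICT (by name: the statement is the Claim_ definition above) =====
theorem sequence_mer_iterator_spec : Claim_equal_sequence_mer_iterator := by
  intro k seq _ hpre
  unfold Spec_sequence_mer_iterator
  exact sequence_mer_iterator_eq_alt k seq hpre.1
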